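-- pv_equiv track=rewrite | github.com/dragneel786/leetcode_practise | DCP-03-25/Count-Total-Number-of-Colored-Cells.py | coloredCells
-- ===== SOURCE A (Python) =====
-- def coloredCells(n: int) -> int:
--     if n == 1:
--         return 1
--
--     ans = 4
--     res = 5
--     for i in range(3, n + 1):
--         res += (ans + 4)
--         ans += 4
--
--     return res
--
--
--
--     return ans
-- ===== SOURCE B (Python) =====
-- def coloredCells(n: int) -> int:
--     # closed form: the diamond after n minutes has 2*n^2 - 2*n + 1 cells
--     return 2 * n * n - 2 * n + 1
-- ===== Notes on version B (the rewrite author's own statement) =====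
-- stated objective: faster
-- what changed: Replaced the O(n) accumulation loop by the closed form 2*n^2-2*n+1.
-- outside the precondition, e.g. on coloredCells(0): A returns 5, B returns 1; on coloredCells(-3): A returns 5, B returns 25
import Mathlib
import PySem

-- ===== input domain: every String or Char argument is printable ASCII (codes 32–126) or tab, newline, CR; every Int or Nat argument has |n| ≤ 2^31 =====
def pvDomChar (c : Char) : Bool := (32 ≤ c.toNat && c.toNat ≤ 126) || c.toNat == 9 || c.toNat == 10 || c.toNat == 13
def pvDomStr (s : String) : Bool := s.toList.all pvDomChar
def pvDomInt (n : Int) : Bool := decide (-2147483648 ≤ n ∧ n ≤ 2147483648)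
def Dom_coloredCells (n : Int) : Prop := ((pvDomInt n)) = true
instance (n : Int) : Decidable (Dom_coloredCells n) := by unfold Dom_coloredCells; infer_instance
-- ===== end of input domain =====

-- B replaces A's O(n) accumulation loop by the closed form 2*n^2 - 2*n + 1 (faster, asymptotic).


-- ===== PORT A =====
def coloredCells (n : Int) : Int :=
  if n == 1 then 1
  else
    -- ans = 4, res = 5; for i in range(3, n+1): res += ans + 4; ans += 4; return res
    ((PySem.List.pyRange 3 (n + 1) 1).foldl
      (fun (p : Int × Int) _ => (p.1 + 4, p.2 + (p.1 + 4))) (4, 5)).2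

-- ===== PORT B =====
def coloredCells_alt (n : Int) : Int := 2 * n * n - 2 * n + 1

-- ===== PRECONDITION & SPEC =====
-- Pre_ excludes nonpositive n (outside the problem's natural domain of n ≥ 1 minutes), where A's
-- loop never runs and it returns its leftover initialisation value (cited in claim.json), while B returns the closed form.
def Pre_coloredCells (n : Int) : Prop := 1 ≤ n
instance (n : Int) : Decidable (Pre_coloredCells n) := by unfold Pre_coloredCells; infer_instance
def pvWitness_coloredCells : Int := (3)
def Spec_coloredCells (n : Int) (out : Int) : Prop := out = coloredCells_alt n
instance (n : Int) (out : Int) : Decidable (Spec_coloredCells n out) := by unfold Spec_coloredCells; infer_instance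

-- ===== CLAIM (what is proved, stated in full; the proofs are below) =====
def Claim_equal_coloredCells : Prop := ∀ (n : Int), Dom_coloredCells n → Pre_coloredCells n → Spec_coloredCells n (coloredCells n)

-- ===== LEMMAS AND PROOFS =====

-- loop invariant: after k iterations the state is (4*k + 4, 2*(k+2)^2 - 2*(k+2) + 1)
theorem coloredCells_loop (k : Nat) :
    (PySem.List.pyRange 3 (3 + k) 1).foldl
      (fun (p : Int × Int) _ => (p.1 + 4, p.2 + (p.1 + 4))) (4, 5)
    = (4 * (k : Int) + 4, 2 * ((k : Int) + 2) ^ 2 - 2 * ((k : Int) + 2) + 1) := by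
  induction k with
  | zero => simp [PySem.List.pyRange_one_eq_nil]
  | succ k ih =>
    have h : (3 : Int) ≤ 3 + (k : Int) := by omega
    have : ((3 : Int) + ((k : Nat) + 1 : Nat)) = (3 + (k : Int)) + 1 := by push_cast; ring
    rw [this, PySem.List.pyRange_one_succ_right h, List.foldl_append, ih]
    simp only [List.foldl_cons, List.foldl_nil]
    simp only [Prod.mk.injEq]
    constructor <;> (push_cast; ring)

theorem coloredCells_spec : Claim_equal_coloredCells := by
  intro n _ hpre
  unfold Spec_coloredCells coloredCells coloredCells_alt
  by_cases h1 : n = 1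
  · subst h1; norm_num
  · have h2 : 2 ≤ n := by unfold Pre_coloredCells at hpre; omega
    have hne : (n == 1) = false := by simp; omega
    rw [hne]
    simp only [Bool.false_eq_true, if_false]
    have hk : n + 1 = 3 + ((n - 2).toNat : Int) := by omega
    rw [hk]
    have := coloredCells_loop (n - 2).toNat
    rw [show ((3:Int) + ((n-2).toNat : Int)) = (3 + ((n-2).toNat : Nat) : Int) by push_cast; ring] at *
    rw [this]
    have hc : (((n - 2).toNat : Int)) = n - 2 := by omega
    rw [hc]; ring
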